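-- pv_equiv track=rewrite | github.com/Hyunseoh/study | copy_of_others.py | left_employee
-- ===== SOURCE A (Python) =====
-- def left_employee(logs):
--     employee_dict = {}
--     for log in logs:
--         employee, record = log
--         if record == "enter":
--             employee_dict[employee] = True
--         else:
--             employee_dict[employee] = False
--     left_employees = []
--     for employee in employee_dict:
--         if employee_dict[employee]:
--             left_employees.append(employee)
--     return sorted(left_employees, reverse=True)
-- ===== SOURCE B (Python) =====
-- def left_employee(logs):
--     decided = set()
--     inside = []
--     for employee, record in reversed(logs):
--         if employee not in decided:
--             decided.add(employee)
--             if record == "enter":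
--                 inside.append(employee)
--     return sorted(inside, reverse=True)
-- ===== Notes on version B (the rewrite author's own statement) =====
-- stated objective: alternative
-- what changed: Instead of a forward pass recording the latest event per employee in a dict and a second filtering pass, B scans the logs BACKWARDS and decides each employee once at the first (i.e. chronologically last) record it meets, appending to the result only on 'enter'; no per-employee state is ever overwritten and the filter pass disappears.
import Mathlib
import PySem

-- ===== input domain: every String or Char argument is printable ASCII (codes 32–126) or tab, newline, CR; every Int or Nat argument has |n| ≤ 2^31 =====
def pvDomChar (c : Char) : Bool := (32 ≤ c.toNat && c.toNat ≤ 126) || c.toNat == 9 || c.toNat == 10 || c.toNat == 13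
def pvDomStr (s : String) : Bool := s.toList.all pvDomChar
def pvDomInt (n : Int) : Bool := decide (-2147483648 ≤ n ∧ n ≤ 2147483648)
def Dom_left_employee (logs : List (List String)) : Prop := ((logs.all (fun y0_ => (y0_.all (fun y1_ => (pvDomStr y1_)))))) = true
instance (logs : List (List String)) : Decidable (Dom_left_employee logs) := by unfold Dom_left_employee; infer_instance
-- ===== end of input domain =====

-- B scans the logs backwards and decides each employee once, at the chronologically last
-- record it meets (append on 'enter'), replacing A's forward dict-of-booleans + filter pass.

-- ===== PORT A =====
-- the unpacking 'employee, record = log' is only reached on 2-element logs (Pre_); other shapes raise in Python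
def pvStepA (d : PySem.Dict String Bool) (log : List String) : PySem.Dict String Bool :=
  match log with
  | [employee, record] =>
      if record == "enter" then d.insert employee true else d.insert employee false
  | _ => d

def left_employee (logs : List (List String)) : List String :=
  let employee_dict : PySem.Dict String Bool := logs.foldl pvStepA PySem.Dict.empty
  let left_employees : List String :=
    employee_dict.keys.foldl
      (fun acc employee => if employee_dict.getD employee false then acc ++ [employee] else acc) []
  PySem.List.sorted left_employees (fun x => x) true

-- ===== PORT B =====
def pvStepB (st : PySem.Set String × List String) (log : List String) : PySem.Set String × List String :=
  match log with
  | [employee, record] =>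
      if employee ∈ st.1 then st
      else (PySem.Set.add st.1 employee,
            if record == "enter" then st.2 ++ [employee] else st.2)
  | _ => st

def left_employee_alt (logs : List (List String)) : List String :=
  let st := logs.reverse.foldl pvStepB (PySem.Set.empty, [])
  PySem.List.sorted st.2 (fun x => x) true

-- ===== PRECONDITION & SPEC =====
-- Pre_ excludes logs with an entry of length ≠ 2: there Python's unpacking raises ValueError.
def Pre_left_employee (logs : List (List String)) : Prop :=
  ∀ log ∈ logs, log.length = 2
instance (logs : List (List String)) : Decidable (Pre_left_employee logs) := by unfold Pre_left_employee; infer_instance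
def pvWitness_left_employee : List (List String) := [["a", "enter"], ["b", "enter"], ["a", "leave"]]

def Spec_left_employee (logs : List (List String)) (out : List String) : Prop := out = left_employee_alt logs
instance (logs : List (List String)) (out : List String) : Decidable (Spec_left_employee logs out) := by unfold Spec_left_employee; infer_instance

-- ===== CLAIM (what is proved, stated in full; the proofs are below) =====
def Claim_equal_left_employee : Prop := ∀ (logs : List (List String)), Dom_left_employee logs → Pre_left_employee logs → Spec_left_employee logs (left_employee logs)

-- ===== LEMMAS AND PROOFS =====

-- record of the FIRST log entry mentioning x (skipping malformed entries)
def pvFirstRec : List (List String) → String → Option String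
  | [], _ => none
  | log :: t, x =>
    match log with
    | [e, r] => if e = x then some r else pvFirstRec t x
    | _ => pvFirstRec t x

theorem pvFirstRec_append_single (L : List (List String)) (log : List String) (x : String) :
    pvFirstRec (L ++ [log]) x =
      match pvFirstRec L x with
      | some r => some r
      | none => match log with
                | [e, r] => if e = x then some r else none
                | _ => none := by
  induction L with
  | nil =>
    match log with
    | [] => rfl
    | [_] => rfl
    | [e, r] => rfl
    | _ :: _ :: _ :: _ => rfl
  | cons hd t ih =>
    match hd with
    | [] => exact ih
    | [_] => exact ih
    | _ :: _ :: _ :: _ => exact ih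
    | [e, r] =>
      by_cases h : e = x
      · simp [pvFirstRec, h]
      · simpa [pvFirstRec, h] using ih

-- A's fold computes, for each x, whether x's LAST record (= first of the reverse) is "enter"
theorem pvA_inv (logs : List (List String)) (d : PySem.Dict String Bool) :
    (∀ x, (logs.foldl pvStepA d).getD x false =
      (match pvFirstRec logs.reverse x with
       | some r => (r == "enter")
       | none => d.getD x false))
    ∧ (d.keys.Nodup → (logs.foldl pvStepA d).keys.Nodup) := by
  induction logs generalizing d with
  | nil => exact ⟨fun x => rfl, fun h => h⟩
  | cons log t ih =>
    simp only [List.foldl_cons, List.reverse_cons]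
    refine ⟨fun x => ?_, fun h => ?_⟩
    · rw [(ih (pvStepA d log)).1 x, pvFirstRec_append_single]
      cases hf : pvFirstRec t.reverse x with
      | some r => rfl
      | none =>
        match log with
        | [] => rfl
        | [_] => rfl
        | _ :: _ :: _ :: _ => rfl
        | [e, r] =>
          simp only [pvStepA]
          by_cases he : e = x
          · subst he
            cases hr : (r == "enter") <;> simp [hr]
          · have hx : x ≠ e := fun h => he h.symm
            cases hr : (r == "enter") <;>
              simp [PySem.Dict.getD_insert, hx, he]
    · refine (ih (pvStepA d log)).2 ?_
      match log with
      | [] => exact h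
      | [_] => exact h
      | _ :: _ :: _ :: _ => exact h
      | [e, r] =>
        cases hr : (r == "enter") <;>
          simp only [pvStepA, hr, if_true, if_false, Bool.false_eq_true] <;>
          exact PySem.Dict.nodup_keys_insert _ _ _ h

-- B's fold: x ends up inside iff its first record in L is "enter" and x was undecided
theorem pvB_inv (L : List (List String)) (st : PySem.Set String × List String)
    (hnd : st.2.Nodup) (hsub : ∀ x ∈ st.2, x ∈ st.1) :
    (∀ x, x ∈ (L.foldl pvStepB st).2 ↔
       x ∈ st.2 ∨ (x ∉ st.1 ∧ pvFirstRec L x = some "enter"))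
    ∧ (L.foldl pvStepB st).2.Nodup := by
  induction L generalizing st with
  | nil =>
    refine ⟨fun x => ?_, hnd⟩
    simp [pvFirstRec]
  | cons log t ih =>
    simp only [List.foldl_cons]
    match log with
    | [] => exact ih st hnd hsub
    | [_] => exact ih st hnd hsub
    | _ :: _ :: _ :: _ => exact ih st hnd hsub
    | [e, r] =>
      simp only [pvStepB]
      by_cases he : e ∈ st.1
      · rw [if_pos he]
        obtain ⟨hmem, hnd'⟩ := ih st hnd hsub
        refine ⟨fun x => ?_, hnd'⟩
        rw [hmem x]
        by_cases hx : e = x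
        · subst hx; simp [pvFirstRec, he]
        · simp [pvFirstRec, hx]
      · rw [if_neg he]
        by_cases hre : r = "enter"
        · have hb : (r == "enter") = true := by simp [hre]
          rw [if_pos hb]
          have hnd2 : (st.2 ++ [e]).Nodup := by
            refine List.Nodup.append hnd (List.nodup_singleton e) ?_
            intro a ha hb'
            rw [List.mem_singleton] at hb'
            exact he (hb' ▸ hsub a ha)
          have hsub2 : ∀ x ∈ st.2 ++ [e], x ∈ PySem.Set.add st.1 e := by
            intro x hx
            rw [PySem.Set.mem_add]
            rcases List.mem_append.1 hx with h | h
            · exact Or.inl (hsub x h)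
            · rw [List.mem_singleton] at h; exact Or.inr h
          obtain ⟨hmem, hnd'⟩ := ih (PySem.Set.add st.1 e, st.2 ++ [e]) hnd2 hsub2
          refine ⟨fun x => ?_, hnd'⟩
          rw [hmem x]
          by_cases hx : e = x
          · subst hx
            simp [pvFirstRec, he, hre]
          · have hx' : x ≠ e := fun h => hx h.symm
            simp [pvFirstRec, hx, hx', PySem.Set.mem_add]
        · have hb : ¬((r == "enter") = true) := by simp [hre]
          rw [if_neg hb]
          have hsub2 : ∀ x ∈ st.2, x ∈ PySem.Set.add st.1 e := by
            intro x hx; rw [PySem.Set.mem_add]; exact Or.inl (hsub x hx)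
          obtain ⟨hmem, hnd'⟩ := ih (PySem.Set.add st.1 e, st.2) hnd hsub2
          refine ⟨fun x => ?_, hnd'⟩
          rw [hmem x]
          by_cases hx : e = x
          · subst hx
            simp [pvFirstRec, he, hre]
          · have hx' : x ≠ e := fun h => hx h.symm
            simp [pvFirstRec, hx, hx', PySem.Set.mem_add]

theorem left_employee_spec : Claim_equal_left_employee := by
  intro logs _ _
  unfold Spec_left_employee left_employee left_employee_alt
  dsimp only
  obtain ⟨hA, hAk⟩ := pvA_inv logs PySem.Dict.empty
  have hk : (logs.foldl pvStepA PySem.Dict.empty).keys.Nodup :=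
    hAk (by simp [PySem.Dict.empty, PySem.Dict.keys])
  obtain ⟨hB, hBnd⟩ := pvB_inv logs.reverse (PySem.Set.empty, []) (by simp) (by simp)
  set d := logs.foldl pvStepA PySem.Dict.empty with hd
  set s := (logs.reverse.foldl pvStepB (PySem.Set.empty, [])).2 with hs
  rw [PySem.List.foldl_append_if_eq_filter]
  simp only [List.nil_append]
  have hgetD : ∀ x, d.getD x false = true ↔ pvFirstRec logs.reverse x = some "enter" := by
    intro x
    rw [hA x]
    cases hf : pvFirstRec logs.reverse x with
    | none =>
      simp [PySem.Dict.getD, PySem.Dict.get?, PySem.Dict.empty]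
    | some r => simp
  have hfilt_mem : ∀ x, x ∈ d.keys.filter (fun e => d.getD e false) ↔ x ∈ s := by
    intro x
    rw [List.mem_filter, hs, hB x]
    constructor
    · rintro ⟨-, h⟩
      exact Or.inr ⟨by simp [PySem.Set.empty], (hgetD x).1 h⟩
    · rintro (h | ⟨-, h⟩)
      · simp at h
      · have ht := (hgetD x).2 h
        refine ⟨?_, ht⟩
        by_contra hnk
        rw [← PySem.Dict.get?_eq_none_iff_not_mem_keys] at hnk
        simp [PySem.Dict.getD, hnk] at ht
  have hperm : (d.keys.filter (fun e => d.getD e false)).Perm s :=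
    (List.perm_ext_iff_of_nodup (hk.filter _) hBnd).2 hfilt_mem
  have h1 : (PySem.List.sorted s (fun x => x) true).Perm (d.keys.filter fun e => d.getD e false) :=
    (PySem.List.sorted_perm ..).trans hperm.symm
  have hpw : (PySem.List.sorted s (fun x => x) true).Pairwise (fun a b : String => b < a) := by
    have hle := PySem.List.sorted_pairwise_rev s (fun x => x)
    have hnd' : (PySem.List.sorted s (fun x => x) true).Nodup :=
      (PySem.List.sorted_perm ..).nodup_iff.2 hBnd
    exact (hle.and hnd').imp (fun {a b} h => lt_of_le_of_ne h.1 (Ne.symm h.2))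
  exact PySem.List.sorted_rev_eq_of_perm_of_pairwise_gt _ _ _ h1 hpw
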